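-- pv_equiv track=rewrite | github.com/IanniMuliterno/code_solved_exercises | basic_python/tec_challenge.py | count_gender_from_string
-- ===== SOURCE A (Python) =====
-- def count_gender_from_string(string: str) -> str:
--     """
--     Counts the occurrences of characters representing genders ('W', 'M', 'C') within a string
--     and returns a string summarizing the counts in descending order of frequency.
--
--     Args:
--         string: The input string to analyze.
--
--     Returns:
--         A string representing the counts of each gender character, ordered from most frequent to least frequent.
--         The format is "{count1}{gender1}{count2}{gender2}{count3}{gender3}", where counts are integers and genders are 'W', 'M', or 'C'.
--         If a gender character is not found, its count will be 0.
--
--     Example: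
--         count_gender_from_string("WWMMCCW") == "3W2M2C"
--         count_gender_from_string("WMC") == "1W1M1C"
--         count_gender_from_string("AAAA") == "0W0M0C"  # Handles cases where no gender characters are present.
--     """
--     dic = {'W': 0, 'M': 0, 'C': 0}
--
--     for gender in dic.keys():
--         dic[gender] = string.count(gender)
--
--     dic = dict(sorted(dic.items(), key=lambda item: item[1], reverse=True))
--
--     result = ''
--     for key, value in dic.items():
--         result += str(value) + key
--
--     return result
-- ===== SOURCE B (Python) =====
-- def count_gender_from_string(string: str) -> str:
--     # One pass over the string with three plain counters, then an explicit
--     # stable three-way comparison instead of dict + sorted.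
--     w = m = c = 0
--     for ch in string:
--         if ch == 'W':
--             w += 1
--         elif ch == 'M':
--             m += 1
--         elif ch == 'C':
--             c += 1
--     if w >= m:
--         if c <= m:
--             order = ((w, 'W'), (m, 'M'), (c, 'C'))
--         elif c <= w:
--             order = ((w, 'W'), (c, 'C'), (m, 'M'))
--         else:
--             order = ((c, 'C'), (w, 'W'), (m, 'M'))
--     else:
--         if c <= w:
--             order = ((m, 'M'), (w, 'W'), (c, 'C'))
--         elif c <= m:
--             order = ((m, 'M'), (c, 'C'), (w, 'W'))
--         else:
--             order = ((c, 'C'), (m, 'M'), (w, 'W'))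
--     (n1, k1), (n2, k2), (n3, k3) = order
--     return str(n1) + k1 + str(n2) + k2 + str(n3) + k3
-- ===== Notes on version B (the rewrite author's own statement) =====
-- stated objective: alternative
-- what changed: Replaces the three whole-string str.count scans and the dict+sorted+rebuild pipeline with a single counting pass over the string and an explicit stable three-way comparison that emits the descending order directly.
import Mathlib
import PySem

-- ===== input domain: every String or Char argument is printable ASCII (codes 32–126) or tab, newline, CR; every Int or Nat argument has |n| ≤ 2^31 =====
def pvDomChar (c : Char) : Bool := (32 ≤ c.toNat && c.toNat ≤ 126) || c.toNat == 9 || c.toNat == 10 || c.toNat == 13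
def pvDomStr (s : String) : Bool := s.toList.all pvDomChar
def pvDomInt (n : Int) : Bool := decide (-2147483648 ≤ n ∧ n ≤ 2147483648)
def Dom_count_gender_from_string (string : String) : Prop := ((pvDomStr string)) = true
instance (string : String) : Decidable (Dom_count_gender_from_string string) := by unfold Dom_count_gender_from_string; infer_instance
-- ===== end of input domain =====

-- B replaces the three whole-string .count scans plus dict+sorted with one counting
-- pass and an explicit stable three-way comparison (objective: alternative).

-- ===== PORT A =====
def count_gender_from_string (string : String) : String :=
  -- dic = {'W': 0, 'M': 0, 'C': 0}
  let dic : PySem.Dict String Int := PySem.Dict.ofList [("W", 0), ("M", 0), ("C", 0)]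
  -- for gender in dic.keys(): dic[gender] = string.count(gender)
  let dic := dic.keys.foldl (fun d g => d.insert g ((PySem.Str.count string g : Int))) dic
  -- dic = dict(sorted(dic.items(), key=lambda item: item[1], reverse=True))
  let dic := PySem.Dict.ofList (PySem.List.sorted dic.items (fun item => item.2) true)
  -- result = ''; for key, value in dic.items(): result += str(value) + key
  let result := dic.items.foldl (fun r kv => r ++ PySem.Int.toStr kv.2 ++ kv.1) ""
  result

-- ===== PORT B =====
def count_gender_from_string_alt (string : String) : String :=
  -- w = m = c = 0; for ch in string: if/elif chain
  let wmc := string.toList.foldl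
    (fun (s : Int × Int × Int) ch =>
      if ch == 'W' then (s.1 + 1, s.2.1, s.2.2)
      else if ch == 'M' then (s.1, s.2.1 + 1, s.2.2)
      else if ch == 'C' then (s.1, s.2.1, s.2.2 + 1)
      else s)
    (0, 0, 0)
  let w := wmc.1
  let m := wmc.2.1
  let c := wmc.2.2
  let order :=
    if m ≤ w then
      if c ≤ m then ((w, "W"), ((m, "M"), (c, "C")))
      else if c ≤ w then ((w, "W"), ((c, "C"), (m, "M")))
      else ((c, "C"), ((w, "W"), (m, "M")))
    else
      if c ≤ w then ((m, "M"), ((w, "W"), (c, "C")))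
      else if c ≤ m then ((m, "M"), ((c, "C"), (w, "W")))
      else ((c, "C"), ((m, "M"), (w, "W")))
  PySem.Int.toStr order.1.1 ++ order.1.2 ++ PySem.Int.toStr order.2.1.1 ++ order.2.1.2
    ++ PySem.Int.toStr order.2.2.1 ++ order.2.2.2

-- ===== PRECONDITION & SPEC =====
def Spec_count_gender_from_string (string : String) (out : String) : Prop := out = count_gender_from_string_alt string
instance (string : String) (out : String) : Decidable (Spec_count_gender_from_string string out) := by unfold Spec_count_gender_from_string; infer_instance

-- ===== CLAIM (what is proved, stated in full; the proofs are below) =====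
def Claim_equal_count_gender_from_string : Prop := ∀ (string : String), Dom_count_gender_from_string string → Spec_count_gender_from_string string (count_gender_from_string string)

-- ===== LEMMAS AND PROOFS =====

-- str.count with a single-character needle is the number of occurrences of that character.
lemma chars_count_go_singleton (c : Char) (cs : List Char) :
    ∀ (fuel acc : Nat), cs.length ≤ fuel →
      PySem.Chars.count.go [c] fuel cs acc = acc + cs.count c := by
  induction cs with
  | nil => intro fuel acc h; cases fuel <;> simp [PySem.Chars.count.go]
  | cons h t ih =>
    intro fuel acc hf
    cases fuel with
    | zero => simp at hf
    | succ f =>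
      have hf' : t.length ≤ f := by simp at hf; omega
      by_cases hc : h = c <;>
        simp [PySem.Chars.count.go, List.isPrefixOf, hc, ih f _ hf'] <;>
        first | omega | exact fun hch => hc hch.symm

lemma chars_count_singleton (c : Char) (cs : List Char) :
    PySem.Chars.count cs [c] = cs.count c := by
  simp [PySem.Chars.count, chars_count_go_singleton c cs cs.length 0 le_rfl]

-- B's one-pass triple accumulator counts the three characters.
lemma foldl_wmc (cs : List Char) (a b d : Int) :
    cs.foldl
      (fun (s : Int × Int × Int) ch =>
        if ch == 'W' then (s.1 + 1, s.2.1, s.2.2)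
        else if ch == 'M' then (s.1, s.2.1 + 1, s.2.2)
        else if ch == 'C' then (s.1, s.2.1, s.2.2 + 1)
        else s)
      (a, b, d)
    = (a + cs.count 'W', b + cs.count 'M', d + cs.count 'C') := by
  induction cs generalizing a b d with
  | nil => simp
  | cons h t ih =>
    rw [List.foldl_cons]
    by_cases hW : h = 'W'
    · rw [show (h == 'W') = true by simp [hW]]
      simp only [if_true]
      rw [ih, hW]
      simp [Prod.ext_iff]
      omega
    · rw [show (h == 'W') = false by simp [hW]]
      simp only [Bool.false_eq_true, if_false]
      by_cases hM : h = 'M'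
      · rw [show (h == 'M') = true by simp [hM]]
        simp only [if_true]
        rw [ih, hM]
        simp [Prod.ext_iff]
        omega
      · rw [show (h == 'M') = false by simp [hM]]
        simp only [Bool.false_eq_true, if_false]
        by_cases hC : h = 'C'
        · rw [show (h == 'C') = true by simp [hC]]
          simp only [if_true]
          rw [ih, hC]
          simp [Prod.ext_iff]
          omega
        · rw [show (h == 'C') = false by simp [hC]]
          simp only [Bool.false_eq_true, if_false]
          rw [ih]
          simp [hW, hM, hC]

-- A's tail (stable descending sort of the three items, rebuilt dict, concatenation)
-- equals B's explicit three-way comparison, for arbitrary counts.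
lemma tail_eq (w m c : Int) :
    (PySem.Dict.ofList (PySem.List.sorted [(("W" : String), w), ("M", m), ("C", c)]
        (fun it => it.2) true)).items.foldl
      (fun r kv => r ++ PySem.Int.toStr kv.2 ++ kv.1) ""
    =
    (let order :=
      if m ≤ w then
        if c ≤ m then ((w, "W"), ((m, "M"), (c, "C")))
        else if c ≤ w then ((w, "W"), ((c, "C"), (m, "M")))
        else ((c, "C"), ((w, "W"), (m, "M")))
      else
        if c ≤ w then ((m, "M"), ((w, "W"), (c, "C")))
        else if c ≤ m then ((m, "M"), ((c, "C"), (w, "W")))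
        else ((c, "C"), ((m, "M"), (w, "W")));
     PySem.Int.toStr order.1.1 ++ order.1.2 ++ PySem.Int.toStr order.2.1.1 ++ order.2.1.2
       ++ PySem.Int.toStr order.2.2.1 ++ order.2.2.2) := by
  rw [PySem.List.sorted_rev_eq_foldl_insertBy]
  by_cases h1 : m ≤ w
  · by_cases h2 : c ≤ m
    · have a1 : ¬ (w < m) := by omega
      have a2 : ¬ (m < c) := by omega
      have a3 : ¬ (w < c) := by omega
      simp [PySem.List.insertBy, PySem.Dict.ofList, PySem.Dict.update, PySem.Dict.insert, PySem.Dict.empty,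
        PySem.Dict.contains, List.foldl, String.append_assoc, a1, a2, a3, h1, h2]
    · by_cases h3 : c ≤ w
      · have a1 : ¬ (w < m) := by omega
        have a2 : m < c := by omega
        have a3 : ¬ (w < c) := by omega
        simp [PySem.List.insertBy, PySem.Dict.ofList, PySem.Dict.update, PySem.Dict.insert, PySem.Dict.empty,
          PySem.Dict.contains, List.foldl, String.append_assoc, a1, a2, a3, h1, h2, h3]
      · have a1 : ¬ (w < m) := by omega
        have a3 : w < c := by omega
        simp [PySem.List.insertBy, PySem.Dict.ofList, PySem.Dict.update, PySem.Dict.insert, PySem.Dict.empty,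
          PySem.Dict.contains, List.foldl, String.append_assoc, a1, a3, h1, h2, h3]
  · by_cases h3 : c ≤ w
    · have a1 : w < m := by omega
      have a2 : ¬ (m < c) := by omega
      have a3 : ¬ (w < c) := by omega
      simp [PySem.List.insertBy, PySem.Dict.ofList, PySem.Dict.update, PySem.Dict.insert, PySem.Dict.empty,
        PySem.Dict.contains, List.foldl, String.append_assoc, a1, a2, a3, h1, h3]
    · by_cases h2 : c ≤ m
      · have a1 : w < m := by omega
        have a2 : ¬ (m < c) := by omega
        have a3 : w < c := by omega
        simp [PySem.List.insertBy, PySem.Dict.ofList, PySem.Dict.update, PySem.Dict.insert, PySem.Dict.empty,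
          PySem.Dict.contains, List.foldl, String.append_assoc, a1, a2, a3, h1, h2, h3]
      · have a1 : w < m := by omega
        have a2 : m < c := by omega
        simp [PySem.List.insertBy, PySem.Dict.ofList, PySem.Dict.update, PySem.Dict.insert, PySem.Dict.empty,
          PySem.Dict.contains, List.foldl, String.append_assoc, a1, a2, h1, h2, h3]

-- ===== VERDICT (by name: the statement is the Claim_ definition above) =====
theorem count_gender_from_string_spec : Claim_equal_count_gender_from_string := by
  intro s _
  unfold Spec_count_gender_from_string count_gender_from_string count_gender_from_string_alt
  dsimp only
  rw [foldl_wmc]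
  simp only [zero_add]
  have hw : (PySem.Str.count s "W" : Int) = (s.toList.count 'W' : Int) := by
    rw [PySem.Str.count_eq, show ("W" : String).toList = ['W'] from rfl, chars_count_singleton]
  have hm : (PySem.Str.count s "M" : Int) = (s.toList.count 'M' : Int) := by
    rw [PySem.Str.count_eq, show ("M" : String).toList = ['M'] from rfl, chars_count_singleton]
  have hc : (PySem.Str.count s "C" : Int) = (s.toList.count 'C' : Int) := by
    rw [PySem.Str.count_eq, show ("C" : String).toList = ['C'] from rfl, chars_count_singleton]
  have hkeys : (PySem.Dict.ofList [(("W" : String), (0 : Int)), ("M", 0), ("C", 0)]).keys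
      = ["W", "M", "C"] := by decide
  have hloop : (["W", "M", "C"].foldl
        (fun (d : PySem.Dict String Int) g => d.insert g ((PySem.Str.count s g : Int)))
        (PySem.Dict.ofList [(("W" : String), (0 : Int)), ("M", 0), ("C", 0)])).items
      = [("W", (PySem.Str.count s "W" : Int)), ("M", (PySem.Str.count s "M" : Int)),
         ("C", (PySem.Str.count s "C" : Int))] := by
    simp [List.foldl, PySem.Dict.ofList, PySem.Dict.update, PySem.Dict.insert, PySem.Dict.empty, PySem.Dict.contains]
  rw [hkeys, hloop, hw, hm, hc, tail_eq]
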